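-- pv_equiv track=rewrite | github.com/stopdesign/adventofcode | 2023/day_13/code_1.py | symmetry_line_index
-- ===== SOURCE A (Python) =====
-- def symmetry_line_index(pattern: list[str]) -> int:
--     """
--     Returns the index of the row that is the horizontal symmetry line.
--     """
--     for i in range(1, len(pattern)):
--         before = pattern[:i]
--         after = pattern[i:]
--
--         min_len = min(len(before), len(after))
--         if after[:min_len] == before[::-1][:min_len]:
--             return i
--
--     return 0
-- ===== SOURCE B (Python) =====
-- def symmetry_line_index(pattern: list[str]) -> int:
--     """
--     Returns the index of the row that is the horizontal symmetry line.
--     Expands outward from each candidate line, stopping at the first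
--     mismatching pair of rows, instead of building and comparing slices.
--     """
--     n = len(pattern)
--     for i in range(1, n):
--         lo, hi = i - 1, i
--         while lo >= 0 and hi < n and pattern[lo] == pattern[hi]:
--             lo -= 1
--             hi += 1
--         if lo < 0 or hi >= n:
--             return i
--     return 0
-- ===== Notes on version B (the rewrite author's own statement) =====
-- stated objective: faster
-- what changed: B expands outward from each candidate line comparing row pairs in place with early exit at the first mismatch, instead of materialising before/after slices, reversing and comparing them as lists.
import Mathlib
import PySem

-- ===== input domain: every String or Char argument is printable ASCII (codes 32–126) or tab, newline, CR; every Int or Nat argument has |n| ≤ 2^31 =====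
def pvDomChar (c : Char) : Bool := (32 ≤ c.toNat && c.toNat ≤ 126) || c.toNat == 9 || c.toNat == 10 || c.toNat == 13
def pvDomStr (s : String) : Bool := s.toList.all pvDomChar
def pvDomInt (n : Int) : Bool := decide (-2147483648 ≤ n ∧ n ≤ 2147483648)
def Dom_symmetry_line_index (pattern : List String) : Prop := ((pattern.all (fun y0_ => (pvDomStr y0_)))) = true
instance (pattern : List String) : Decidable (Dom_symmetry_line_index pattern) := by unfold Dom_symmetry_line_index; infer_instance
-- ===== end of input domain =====

-- B replaces A's slice-reverse-compare per split by an in-place outward expansion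
-- with early exit at the first mismatching row pair (objective: faster, constant-factor).

-- ===== PORT A =====
-- loop body of A: for i in range(1, len(pattern)): … return i / fall through to 0
def pvALoop (pattern : List String) : List Int → Int
  | [] => 0
  | i :: rest =>
    let before := PySem.List.slice pattern none (some i)
    let after := PySem.List.slice pattern (some i) none
    let min_len : Int := min (before.length : Int) (after.length : Int)
    -- before[::-1]: slice with step -1 is always some for step ≠ 0
    let revBefore := (PySem.List.slice? before none none (-1)).getD []
    if PySem.List.slice after none (some min_len)
        = PySem.List.slice revBefore none (some min_len) then i
    else pvALoop pattern rest

def symmetry_line_index (pattern : List String) : Int :=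
  pvALoop pattern (PySem.List.pyRange 1 (pattern.length : Int) 1)

-- ===== PORT B =====
-- B's while loop: expand lo,hi outward while both in range and rows equal;
-- afterwards report whether a boundary was reached (lo < 0 or hi >= n)
def pvExpand (pattern : List String) (lo hi : Int) : Bool :=
  if h : 0 ≤ lo ∧ hi < (pattern.length : Int)
        ∧ PySem.List.pyGet? pattern lo = PySem.List.pyGet? pattern hi then
    pvExpand pattern (lo - 1) (hi + 1)
  else
    decide (lo < 0 ∨ (pattern.length : Int) ≤ hi)
termination_by (lo + 1).toNat
decreasing_by omega

def pvBLoop (pattern : List String) : List Int → Int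
  | [] => 0
  | i :: rest => if pvExpand pattern (i - 1) i then i else pvBLoop pattern rest

def symmetry_line_index_alt (pattern : List String) : Int :=
  pvBLoop pattern (PySem.List.pyRange 1 (pattern.length : Int) 1)

-- ===== PRECONDITION & SPEC =====
def Spec_symmetry_line_index (pattern : List String) (out : Int) : Prop := out = symmetry_line_index_alt pattern
instance (pattern : List String) (out : Int) : Decidable (Spec_symmetry_line_index pattern out) := by unfold Spec_symmetry_line_index; infer_instance

-- ===== CLAIM (what is proved, stated in full; the proofs are below) =====
def Claim_equal_symmetry_line_index : Prop := ∀ (pattern : List String), Dom_symmetry_line_index pattern → Spec_symmetry_line_index pattern (symmetry_line_index pattern)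

-- ===== LEMMAS AND PROOFS =====

-- the common "mirror" condition both loop bodies decide
def pvMirror (pattern : List String) (lo hi : Int) : Prop :=
  ∀ t : Int, 0 ≤ t → 0 ≤ lo - t → hi + t < (pattern.length : Int) →
    PySem.List.pyGet? pattern (lo - t) = PySem.List.pyGet? pattern (hi + t)

theorem pvExpand_true_iff (pattern : List String) (lo hi : Int) :
    pvExpand pattern lo hi = true ↔ pvMirror pattern lo hi := by
  induction lo, hi using pvExpand.induct pattern with
  | case1 lo hi h ih =>
    rw [pvExpand, dif_pos h]
    obtain ⟨h0, hn, heq⟩ := h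
    rw [ih]
    constructor
    · intro hm t ht hlo hhi
      rcases eq_or_lt_of_le ht with h' | h'
      · have e1 : lo - t = lo := by omega
        have e2 : hi + t = hi := by omega
        rw [e1, e2]; exact heq
      · have := hm (t - 1) (by omega) (by omega) (by omega)
        have e1 : lo - 1 - (t - 1) = lo - t := by ring
        have e2 : hi + 1 + (t - 1) = hi + t := by ring
        rwa [e1, e2] at this
    · intro hm t ht hlo hhi
      have := hm (t + 1) (by omega) (by omega) (by omega)
      have e1 : lo - (t + 1) = lo - 1 - t := by ring
      have e2 : hi + (t + 1) = hi + 1 + t := by ring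
      rwa [e1, e2] at this
  | case2 lo hi h =>
    rw [pvExpand, dif_neg h]
    simp only [not_and] at h
    simp only [decide_eq_true_eq]
    constructor
    · intro hb t ht hlo hhi
      exfalso; omega
    · intro hm
      by_contra hb
      simp only [not_or, not_lt] at hb
      have hcontra := hm 0 le_rfl (by omega) (by omega)
      simp only [sub_zero, add_zero] at hcontra
      exact (h hb.1 (by omega)) hcontra

-- A's slice-equality condition is the same mirror condition (for 1 ≤ i < n)
theorem pvCondA_iff (pattern : List String) (i : Int)
    (h1 : 1 ≤ i) (h2 : i < (pattern.length : Int)) :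
    (PySem.List.slice (PySem.List.slice pattern (some i) none) none
        (some (min ((PySem.List.slice pattern none (some i)).length : Int)
                   ((PySem.List.slice pattern (some i) none).length : Int)))
      = PySem.List.slice
          ((PySem.List.slice? (PySem.List.slice pattern none (some i)) none none (-1)).getD [])
          none
          (some (min ((PySem.List.slice pattern none (some i)).length : Int)
                     ((PySem.List.slice pattern (some i) none).length : Int))))
    ↔ pvMirror pattern (i - 1) i := by
  set n := pattern.length with hn
  obtain ⟨j, rfl⟩ : ∃ j : ℕ, i = (j : Int) := ⟨i.toNat, by omega⟩
  have hj1 : 1 ≤ j := by exact_mod_cast h1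
  have hj2 : j < n := by exact_mod_cast h2
  rw [PySem.List.slice_to_natCast, PySem.List.slice_from_natCast,
      PySem.List.slice?_none_none_neg_one]
  simp only [Option.getD_some]
  have hlb : (pattern.take j).length = j := by
    simp [List.length_take]; omega
  have hla : (pattern.drop j).length = n - j := by simp [hn]
  rw [hlb, hla]
  have hmc : min ((j : Int)) (((n - j : ℕ) : Int)) = ((min j (n - j) : ℕ) : Int) := by
    push_cast; omega
  rw [hmc, PySem.List.slice_to_natCast, PySem.List.slice_to_natCast]
  set m := min j (n - j) with hmdef
  have hm1 : m ≤ n - j := Nat.min_le_right _ _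
  have hm2 : m ≤ j := Nat.min_le_left _ _
  have hlen1 : ((pattern.drop j).take m).length = m := by simp [hla]; omega
  have hlen2 : (((pattern.take j).reverse).take m).length = m := by simp [hlb]; omega
  have key : (List.take m (List.drop j pattern)
        = List.take m (List.take j pattern).reverse)
      ↔ ∀ k : ℕ, k < m → pattern[j + k]? = pattern[j - 1 - k]? := by
    constructor
    · intro he k hk
      have hthis := congrArg (fun l => l[k]?) he
      simp only at hthis
      rw [List.getElem?_take, if_pos hk, List.getElem?_take, if_pos hk,
          List.getElem?_drop,
          List.getElem?_reverse (by rw [hlb]; omega), hlb,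
          List.getElem?_take, if_pos (by omega)] at hthis
      exact hthis
    · intro hq
      apply List.ext_getElem?
      intro k
      by_cases hk : k < m
      · rw [List.getElem?_take, if_pos hk, List.getElem?_take, if_pos hk,
            List.getElem?_drop,
            List.getElem?_reverse (by rw [hlb]; omega), hlb,
            List.getElem?_take, if_pos (by omega)]
        exact hq k hk
      · rw [List.getElem?_eq_none (by rw [hlen1]; omega),
            List.getElem?_eq_none (by rw [hlen2]; omega)]
  rw [key]
  constructor
  · intro hq t ht hlo hhi
    obtain ⟨k, rfl⟩ : ∃ k : ℕ, t = (k : Int) := ⟨t.toNat, by omega⟩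
    have hk : k < m := by
      have hk1 : (k : Int) ≤ (j : Int) - 1 := by omega
      have hk2 : (j : Int) + k < n := by omega
      omega
    have hq' := hq k hk
    have e1 : (j : Int) - 1 - (k : Int) = ((j - 1 - k : ℕ) : Int) := by omega
    have e2 : (j : Int) + (k : Int) = ((j + k : ℕ) : Int) := by omega
    rw [e1, e2, PySem.List.pyGet?_natCast, PySem.List.pyGet?_natCast]
    exact hq'.symm
  · intro hmir k hk
    have hmir' := hmir (k : Int) (by positivity) (by omega) (by omega)
    have e1 : (j : Int) - 1 - (k : Int) = ((j - 1 - k : ℕ) : Int) := by omega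
    have e2 : (j : Int) + (k : Int) = ((j + k : ℕ) : Int) := by omega
    rw [e1, e2, PySem.List.pyGet?_natCast, PySem.List.pyGet?_natCast] at hmir'
    exact hmir'.symm

-- the two loops agree index by index
theorem pvLoop_eq (pattern : List String) (l : List Int)
    (hl : ∀ i ∈ l, 1 ≤ i ∧ i < (pattern.length : Int)) :
    pvALoop pattern l = pvBLoop pattern l := by
  induction l with
  | nil => rfl
  | cons i rest ih =>
    obtain ⟨h1, h2⟩ := hl i List.mem_cons_self
    have hcond := (pvCondA_iff pattern i h1 h2).trans
      (pvExpand_true_iff pattern (i - 1) i).symm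
    simp only [pvALoop, pvBLoop]
    by_cases h : pvExpand pattern (i - 1) i = true
    · rw [if_pos h, if_pos (hcond.mpr h)]
    · rw [if_neg h, if_neg (fun hc => h (hcond.mp hc))]
      exact ih (fun x hx => hl x (List.mem_cons_of_mem _ hx))

-- ===== VERDICT (by name: the statement is the Claim_ definition above) =====
theorem symmetry_line_index_spec : Claim_equal_symmetry_line_index := by
  intro pattern _
  unfold Spec_symmetry_line_index symmetry_line_index symmetry_line_index_alt
  apply pvLoop_eq
  intro i hi
  have := PySem.List.mem_pyRange_one.mp hi
  exact ⟨this.1, this.2⟩
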